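-- pv_equiv track=rewrite | github.com/dich1123/lolkek | main_2048.py | del_prob
-- ===== SOURCE A (Python) =====
-- def del_prob(a):  # a - один список, который выполняет роль строки
--     b = []
--     for i in a:
--         if i != '_':
--             b.append(i)
--     b.reverse()
--     while len(b) != len(a):
--         b.append('_')
--     b.reverse()
--     return (b)
-- ===== SOURCE B (Python) =====
-- def del_prob(a):  # stable sort: False (underscores) sort before True, order of the rest preserved
--     return sorted(a, key=lambda x: x != '_')
-- ===== Notes on version B (the rewrite author's own statement) =====
-- stated objective: idiomatic
-- what changed: B replaces A's filter/reverse/pad-while-loop/reverse construction with a single stable sort by the boolean key x != '_', relying on sort stability to keep the non-underscore order.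
import Mathlib
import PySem

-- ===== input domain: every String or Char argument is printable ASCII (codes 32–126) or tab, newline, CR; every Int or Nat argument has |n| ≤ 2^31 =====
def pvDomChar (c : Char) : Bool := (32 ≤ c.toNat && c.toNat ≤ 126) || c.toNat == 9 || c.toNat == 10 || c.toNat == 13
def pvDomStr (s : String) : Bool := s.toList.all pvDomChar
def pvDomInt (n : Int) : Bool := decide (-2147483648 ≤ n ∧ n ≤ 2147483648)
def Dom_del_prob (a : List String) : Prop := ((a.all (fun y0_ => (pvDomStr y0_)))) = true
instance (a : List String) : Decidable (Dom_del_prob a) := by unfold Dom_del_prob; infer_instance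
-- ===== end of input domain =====

-- B replaces A's filter/reverse/pad-loop/reverse with one stable sort by the boolean key x != '_' (objective: idiomatic).

-- ===== PORT A =====
-- while len(b) != len(a): b.append('_') — the loop only ever runs with len(b) ≤ target,
-- so the extra 'b.length < target' conjunct, which makes the recursion total, never changes behaviour.
def delProbPad (target : Nat) (b : List String) : List String :=
  if b.length ≠ target ∧ b.length < target then delProbPad target (b ++ ["_"]) else b
termination_by target - b.length
decreasing_by simp_all; omega

def del_prob (a : List String) : List String :=
  let b := a.foldl (fun b i => if i ≠ "_" then b ++ [i] else b) []
  let b := b.reverse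
  let b := delProbPad a.length b
  b.reverse

-- ===== PORT B =====
-- Python's bool key (x != '_') compares as the ints 0/1; ported as the Nat key below. Stable sort = PySem.List.sorted.
def del_prob_alt (a : List String) : List String :=
  PySem.List.sorted a (fun x => if x ≠ "_" then (1 : Nat) else 0) false

-- ===== PRECONDITION & SPEC =====
def Spec_del_prob (a : List String) (out : List String) : Prop := out = del_prob_alt a
instance (a : List String) (out : List String) : Decidable (Spec_del_prob a out) := by unfold Spec_del_prob; infer_instance

-- ===== CLAIM =====
def Claim_equal_del_prob : Prop := ∀ (a : List String), Dom_del_prob a → Spec_del_prob a (del_prob a)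

-- ===== LEMMAS AND PROOFS =====

theorem del_prob_foldl_filter (a : List String) (acc : List String) :
    a.foldl (fun b i => if i ≠ "_" then b ++ [i] else b) acc
      = acc ++ a.filter (fun x => x ≠ "_") := by
  induction a generalizing acc with
  | nil => simp
  | cons x xs ih =>
    rw [List.foldl_cons, List.filter_cons]
    by_cases h : x = "_"
    · rw [if_neg (by simp [h]), ih]; simp [h]
    · rw [if_pos (by simp [h]), ih]; simp [h]

theorem delProbPad_eq (target : Nat) (b : List String) (h : b.length ≤ target) :
    delProbPad target b = b ++ List.replicate (target - b.length) "_" := by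
  induction b using delProbPad.induct target with
  | case1 b hc ih =>
    rw [delProbPad, if_pos hc]
    rw [ih (by simp; omega)]
    have : target - b.length = (target - (b.length + 1)) + 1 := by omega
    simp [this, List.replicate_succ]
  | case2 b hc =>
    rw [delProbPad, if_neg hc]
    have : b.length = target := by omega
    simp [this]

-- A's value in closed form
theorem del_prob_closed (a : List String) :
    del_prob a = List.replicate (a.length - (a.filter (fun x => x ≠ "_")).length) "_"
      ++ a.filter (fun x => x ≠ "_") := by
  unfold del_prob
  rw [del_prob_foldl_filter]
  simp only [List.nil_append]
  rw [delProbPad_eq]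
  · simp
  · simp; exact List.length_filter_le _ _

def pvKey (x : String) : Nat := if x ≠ "_" then 1 else 0
def pvBefore (a b : String) : Bool := decide (pvKey a < pvKey b)

theorem insertBy_underscore (k : Nat) (kept : List String)
    (hk : ∀ y ∈ kept, y ≠ "_") :
    PySem.List.insertBy pvBefore "_" (List.replicate k "_" ++ kept)
      = List.replicate (k + 1) "_" ++ kept := by
  induction k with
  | zero =>
    cases kept with
    | nil => simp [PySem.List.insertBy]
    | cons y ys =>
      have hy : y ≠ "_" := hk y (by simp)
      simp [PySem.List.insertBy, pvBefore, pvKey, hy]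
  | succ n ih =>
    rw [List.replicate_succ, List.cons_append, PySem.List.insertBy]
    have : pvBefore "_" "_" = false := by simp [pvBefore, pvKey]
    rw [this]
    simp only [Bool.false_eq_true, if_false, ih]
    simp [List.replicate_succ]

theorem insertBy_kept (x : String) (hx : x ≠ "_") (l : List String) :
    PySem.List.insertBy pvBefore x l = l ++ [x] := by
  induction l with
  | nil => simp [PySem.List.insertBy]
  | cons y ys ih =>
    have : pvBefore x y = false := by
      simp only [pvBefore, pvKey, ne_eq]
      by_cases hy : y = "_" <;> simp [hx, hy]
    rw [PySem.List.insertBy, this]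
    simp [ih]

theorem foldl_insertBy_inv (a : List String) (k : Nat) (kept : List String)
    (hk : ∀ y ∈ kept, y ≠ "_") :
    a.foldl (fun acc x => PySem.List.insertBy pvBefore x acc)
        (List.replicate k "_" ++ kept)
      = List.replicate (k + a.count "_") "_" ++ (kept ++ a.filter (fun x => x ≠ "_")) := by
  induction a generalizing k kept with
  | nil => simp
  | cons x xs ih =>
    rw [List.foldl_cons]
    by_cases hx : x = "_"
    · subst hx
      rw [insertBy_underscore k kept hk, ih (k + 1) kept hk]
      have hcnt : k + 1 + xs.count "_" = k + (("_" :: xs).count "_") := by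
        simp; omega
      rw [hcnt]
      simp [List.filter_cons]
    · rw [insertBy_kept x hx, List.append_assoc,
        ih k (kept ++ [x]) (by intro y hy; rcases List.mem_append.mp hy with h | h
                               · exact hk y h
                               · simp at h; simpa [h] using hx)]
      have hc : (x :: xs).count "_" = xs.count "_" := by
        simp [hx]
      rw [hc]
      simp [List.filter_cons, hx]

theorem count_add_filter_length (l : List String) :
    l.count "_" + (l.filter (fun x => x ≠ "_")).length = l.length := by
  induction l with
  | nil => simp
  | cons y ys ihy =>
    rw [List.count_cons, List.filter_cons]
    split_ifs with h1 h2 <;> simp_all <;> omega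

-- B's value in the same closed form
theorem del_prob_alt_closed (a : List String) :
    del_prob_alt a = List.replicate (a.length - (a.filter (fun x => x ≠ "_")).length) "_"
      ++ a.filter (fun x => x ≠ "_") := by
  unfold del_prob_alt
  rw [PySem.List.sorted_eq_foldl_insertBy]
  have h := foldl_insertBy_inv a 0 [] (by intro y hy; simp at hy)
  have hb : (fun acc x => PySem.List.insertBy
      (fun a b => decide ((if a ≠ "_" then (1:Nat) else 0) < (if b ≠ "_" then (1:Nat) else 0))) x acc)
      = (fun acc x => PySem.List.insertBy pvBefore x acc) := by
    funext acc x; rfl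
  rw [hb]
  simp only [List.replicate_zero, List.nil_append, Nat.zero_add] at h
  rw [h]
  congr 2
  -- count "_" a = a.length - (filter).length
  have := count_add_filter_length a
  omega

-- ===== VERDICT =====
theorem del_prob_spec : Claim_equal_del_prob := by
  intro a _
  unfold Spec_del_prob
  rw [del_prob_closed, del_prob_alt_closed]
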